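-- pv_equiv track=rewrite | github.com/soham-padia/blockchain-iot-trust | tdcb.py | _detect_byzantine_behavior
-- ===== SOURCE A (Python) =====
-- from typing import Any, List, Dict, Set
--
-- def _detect_byzantine_behavior(
--
--     votes: Dict[str, Dict[str, bool]],
--     delegates: List[str]
-- ) -> List[str]:
--     """
--     Detect delegates voting significantly different from majority.
--     Byzantine nodes consistently vote against consensus.
--     """
--     malicious = []
--
--     # Calculate consensus vote for each transaction
--     tx_hashes = set()
--     for delegate_votes in votes.values():
--         tx_hashes.update(delegate_votes.keys())
--
--     for delegate in delegates:
--         disagreement_count = 0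
--         total_votes = 0
--
--         for tx_hash in tx_hashes:
--             # Majority vote
--             majority_vote = sum(
--                 1 for d in delegates
--                 if votes.get(d, {}).get(tx_hash, False)
--             ) > len(delegates) / 2
--
--             # Delegate's vote
--             delegate_vote = votes.get(delegate, {}).get(tx_hash, False)
--
--             if delegate_vote != majority_vote:
--                 disagreement_count += 1
--             total_votes += 1
--
--         # Flag as malicious if >50% disagreement
--         if total_votes > 0 and disagreement_count / total_votes > 0.5:
--             malicious.append(delegate)
--
--     return malicious
-- ===== SOURCE B (Python) =====
-- from typing import Any, List, Dict, Set
--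
-- def _detect_byzantine_behavior(
--     votes: Dict[str, Dict[str, bool]],
--     delegates: List[str]
-- ) -> List[str]:
--     # Collect all transaction hashes (same union as A).
--     tx_hashes = set()
--     for delegate_votes in votes.values():
--         tx_hashes.update(delegate_votes.keys())
--
--     # Precompute the majority vote for each transaction ONCE (A recomputes it
--     # for every delegate, making A O(D^2 * T); this is O(D * T)).
--     n = len(delegates)
--     majority = {
--         tx: 2 * sum(1 for d in delegates if votes.get(d, {}).get(tx, False)) > n
--         for tx in tx_hashes
--     }
--
--     malicious = []
--     total = len(tx_hashes)
--     for delegate in delegates: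
--         dv = votes.get(delegate, {})
--         disagreements = sum(
--             1 for tx in tx_hashes if dv.get(tx, False) != majority[tx]
--         )
--         if total > 0 and 2 * disagreements > total:
--             malicious.append(delegate)
--     return malicious
-- ===== Notes on version B (the rewrite author's own statement) =====
-- stated objective: faster
-- what changed: B precomputes the per-transaction majority vote once in a dictionary and then scans each delegate against it, instead of recomputing the majority for every (delegate, transaction) pair as A does.
import Mathlib
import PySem

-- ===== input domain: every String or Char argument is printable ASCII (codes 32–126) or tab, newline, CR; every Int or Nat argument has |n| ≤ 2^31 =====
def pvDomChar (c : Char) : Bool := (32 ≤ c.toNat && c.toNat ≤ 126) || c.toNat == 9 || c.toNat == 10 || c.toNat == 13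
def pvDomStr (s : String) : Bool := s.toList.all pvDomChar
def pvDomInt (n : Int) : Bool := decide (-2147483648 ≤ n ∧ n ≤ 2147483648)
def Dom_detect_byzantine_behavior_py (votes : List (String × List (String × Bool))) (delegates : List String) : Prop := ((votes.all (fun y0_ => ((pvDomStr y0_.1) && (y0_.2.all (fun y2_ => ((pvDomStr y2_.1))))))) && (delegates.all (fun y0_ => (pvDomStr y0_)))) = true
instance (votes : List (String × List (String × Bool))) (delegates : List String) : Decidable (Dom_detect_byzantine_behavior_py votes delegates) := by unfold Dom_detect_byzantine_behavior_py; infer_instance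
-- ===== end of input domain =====

-- B precomputes the per-transaction majority vote once in a dictionary (O(D*T))
-- instead of recomputing it for every (delegate, transaction) pair as A does (O(D^2*T)).
-- Python's float comparisons `sum(...) > len/2` and `dis/total > 0.5` are ported exactly as
-- `2*sum > len` and `2*dis > total`, which coincide with them on Dom-sized inputs.

-- ===== PORT A =====
-- shared primitive: Python's `assoc.get(k, dflt)` on the association-list encoding (first match)
def pvGet {α : Type} (l : List (String × α)) (k : String) (dflt : α) : α :=
  ((l.find? (fun p => p.1 == k)).map Prod.snd).getD dflt

def detect_byzantine_behavior_py (votes : List (String × List (String × Bool))) (delegates : List String) : List String :=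
  let tx_hashes : PySem.Set String :=
    votes.foldl (fun s p => PySem.Set.update s (p.2.map Prod.fst)) PySem.Set.empty
  delegates.foldl (fun malicious delegate =>
    let r : Int × Int := tx_hashes.foldl (fun (acc : Int × Int) tx =>
      let majority_vote : Bool :=
        decide ((delegates.foldl (fun c d =>
          if pvGet (pvGet votes d []) tx false then c + 1 else c) (0 : Int)) * 2
          > (delegates.length : Int))
      let delegate_vote : Bool := pvGet (pvGet votes delegate []) tx false
      if delegate_vote ≠ majority_vote then (acc.1 + 1, acc.2 + 1) else (acc.1, acc.2 + 1)) (0, 0)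
    if 0 < r.2 ∧ 2 * r.1 > r.2 then malicious ++ [delegate] else malicious) []

-- ===== PORT B =====
def detect_byzantine_behavior_py_alt (votes : List (String × List (String × Bool))) (delegates : List String) : List String :=
  let tx_hashes : PySem.Set String :=
    votes.foldl (fun s p => PySem.Set.update s (p.2.map Prod.fst)) PySem.Set.empty
  let n : Int := delegates.length
  let majority : PySem.Dict String Bool :=
    tx_hashes.foldl (fun m tx =>
      PySem.Dict.insert m tx
        (decide (2 * delegates.foldl (fun c d =>
          if pvGet (pvGet votes d []) tx false then c + 1 else c) (0 : Int) > n)))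
      PySem.Dict.empty
  let total : Int := tx_hashes.length
  delegates.foldl (fun malicious delegate =>
    let dv : List (String × Bool) := pvGet votes delegate []
    let disagreements : Int := tx_hashes.foldl (fun c tx =>
      if pvGet dv tx false ≠ PySem.Dict.getD majority tx false then c + 1 else c) (0 : Int)
    if 0 < total ∧ 2 * disagreements > total then malicious ++ [delegate] else malicious) []

-- ===== PRECONDITION & SPEC =====
def Spec_detect_byzantine_behavior_py (votes : List (String × List (String × Bool))) (delegates : List String) (out : List String) : Prop := out = detect_byzantine_behavior_py_alt votes delegates
instance (votes : List (String × List (String × Bool))) (delegates : List String) (out : List String) : Decidable (Spec_detect_byzantine_behavior_py votes delegates out) := by unfold Spec_detect_byzantine_behavior_py; infer_instance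

-- ===== CLAIM (what is proved, stated in full; the proofs are below) =====
def Claim_equal_detect_byzantine_behavior_py : Prop := ∀ (votes : List (String × List (String × Bool))) (delegates : List String), Dom_detect_byzantine_behavior_py votes delegates → Spec_detect_byzantine_behavior_py votes delegates (detect_byzantine_behavior_py votes delegates)

-- ===== LEMMAS AND PROOFS =====

-- getD over a fold of inserts: keys not in the folded list are untouched
theorem pv_getD_foldl_insert_not_mem {β : Type} (f : String → β) (l : List String) (x : String)
    (m : PySem.Dict String β) (d0 : β) (hx : x ∉ l) :
    PySem.Dict.getD (l.foldl (fun m tx => PySem.Dict.insert m tx (f tx)) m) x d0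
      = PySem.Dict.getD m x d0 := by
  induction l generalizing m with
  | nil => rfl
  | cons y t ih =>
    simp only [List.foldl_cons]
    have hne : ¬ (x = y) := fun h => hx (h ▸ List.mem_cons_self)
    rw [ih _ (fun h => hx (List.mem_cons_of_mem _ h)), PySem.Dict.getD_insert, if_neg hne]

-- getD over a fold of inserts of a duplicate-free list picks the inserted value
theorem pv_getD_foldl_insert_mem {β : Type} (f : String → β) (l : List String) (x : String)
    (m : PySem.Dict String β) (d0 : β) (hnd : l.Nodup) (hx : x ∈ l) :
    PySem.Dict.getD (l.foldl (fun m tx => PySem.Dict.insert m tx (f tx)) m) x d0 = f x := by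
  induction l generalizing m with
  | nil => cases hx
  | cons y t ih =>
    simp only [List.foldl_cons]
    rcases List.mem_cons.mp hx with h | h
    · subst h
      rw [pv_getD_foldl_insert_not_mem f t x _ d0 (List.nodup_cons.mp hnd).1,
        PySem.Dict.getD_insert, if_pos rfl]
    · exact ih _ (List.nodup_cons.mp hnd).2 h

-- the pair-fold of A computes (the count, start + length)
theorem pv_pair_foldl (p : String → Prop) [DecidablePred p] (l : List String) (a b : Int) :
    l.foldl (fun (acc : Int × Int) tx =>
        if p tx then (acc.1 + 1, acc.2 + 1) else (acc.1, acc.2 + 1)) (a, b)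
      = (l.foldl (fun c tx => if p tx then c + 1 else c) a, b + l.length) := by
  induction l generalizing a b with
  | nil => simp
  | cons y t ih =>
    simp only [List.foldl_cons, List.length_cons]
    by_cases hp : p y <;> simp [hp, ih] <;> ring_nf

-- the set accumulated by the tx-hash loop has no duplicates
theorem pv_txs_nodup (votes : List (String × List (String × Bool))) :
    (votes.foldl (fun s p => PySem.Set.update s (p.2.map Prod.fst)) PySem.Set.empty).Nodup := by
  have h : ∀ (l : List (String × List (String × Bool))) (s : PySem.Set String), s.Nodup →
      (l.foldl (fun s p => PySem.Set.update s (p.2.map Prod.fst)) s).Nodup := by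
    intro l
    induction l with
    | nil => intro s hs; exact hs
    | cons y t ih => intro s hs; exact ih _ (PySem.Set.nodup_update _ _ hs)
  exact h votes PySem.Set.empty List.nodup_nil

-- ===== VERDICT (by name: the statement is the Claim_ definition above) =====
theorem detect_byzantine_behavior_py_spec : Claim_equal_detect_byzantine_behavior_py := by
  intro votes delegates _
  show detect_byzantine_behavior_py votes delegates = detect_byzantine_behavior_py_alt votes delegates
  unfold detect_byzantine_behavior_py detect_byzantine_behavior_py_alt
  set txs := votes.foldl (fun s p => PySem.Set.update s (p.2.map Prod.fst)) PySem.Set.empty with htxs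
  set maj : String → Bool := fun tx =>
    decide ((delegates.foldl (fun c d =>
      if pvGet (pvGet votes d []) tx false then c + 1 else c) (0 : Int)) * 2
      > (delegates.length : Int)) with hmaj
  apply PySem.List.foldl_congr_mem
  intro acc delegate _
  simp only
  rw [pv_pair_foldl]
  have hcnt :
      txs.foldl (fun c tx =>
        if pvGet (pvGet votes delegate []) tx false
            ≠ PySem.Dict.getD (txs.foldl (fun m tx =>
              PySem.Dict.insert m tx
                (decide (2 * delegates.foldl (fun c d =>
                  if pvGet (pvGet votes d []) tx false then c + 1 else c) (0 : Int)
                  > (delegates.length : Int)))) PySem.Dict.empty) tx false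
          then c + 1 else c) (0 : Int)
      = txs.foldl (fun c tx =>
        if pvGet (pvGet votes delegate []) tx false ≠ maj tx
          then c + 1 else c) (0 : Int) := by
    apply PySem.List.foldl_congr_mem
    intro c tx hmem
    rw [pv_getD_foldl_insert_mem
      (fun tx => decide (2 * delegates.foldl (fun c d =>
        if pvGet (pvGet votes d []) tx false then c + 1 else c) (0 : Int)
        > (delegates.length : Int)))
      txs tx _ _ (pv_txs_nodup votes) hmem]
    simp [hmaj, Int.mul_comm]
  simp only [hcnt]
  simp only [hmaj]
  norm_num
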